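-- pv_equiv track=rewrite | github.com/eliotdgl/FinGPT-R1 | stocks_tokenizer/tokenizer_stock_tickers.py | merge_space_marker
-- ===== SOURCE A (Python) =====
-- def merge_space_marker(tokens: list[str], space_marker: str = None) -> list[str]:
--   """
--     Merge tokenized stock tickers and tokenizer's space marker
--   """
--   merged_tokens = []
--   for i, token in enumerate(tokens):
--     if token == space_marker and i + 1 < len(tokens) and tokens[i+1].startswith("<FinGPTICKER_"):
--       merged_tokens.append(space_marker + tokens[i+1])
--     elif not token.startswith("<FinGPTICKER_"):
--       merged_tokens.append(token)
--
--   return merged_tokens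
-- ===== SOURCE B (Python) =====
-- def merge_space_marker(tokens: list[str], space_marker: str = None) -> list[str]:
--     """
--     Merge tokenized stock tickers and tokenizer's space marker
--     (single look-behind pass: non-ticker tokens are emitted eagerly; a ticker
--     token retroactively fuses with a just-emitted space marker).
--     """
--     merged_tokens = []
--     prev = object()  # sentinel distinct from every token and from space_marker
--     for token in tokens:
--         if token.startswith("<FinGPTICKER_"):
--             if prev == space_marker:
--                 merged_tokens[-1] = space_marker + token
--         else:
--             merged_tokens.append(token)
--         prev = token
--     return merged_tokens
-- ===== Notes on version B (the rewrite author's own statement) =====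
-- stated objective: alternative
-- what changed: Replaces A's indexed loop with a one-token look-ahead (tokens[i+1]) by a single look-behind pass with a sentinel-initialised prev: non-ticker tokens are emitted eagerly and a ticker token retroactively fuses into the just-emitted space marker by overwriting the last output element.
import Mathlib
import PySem

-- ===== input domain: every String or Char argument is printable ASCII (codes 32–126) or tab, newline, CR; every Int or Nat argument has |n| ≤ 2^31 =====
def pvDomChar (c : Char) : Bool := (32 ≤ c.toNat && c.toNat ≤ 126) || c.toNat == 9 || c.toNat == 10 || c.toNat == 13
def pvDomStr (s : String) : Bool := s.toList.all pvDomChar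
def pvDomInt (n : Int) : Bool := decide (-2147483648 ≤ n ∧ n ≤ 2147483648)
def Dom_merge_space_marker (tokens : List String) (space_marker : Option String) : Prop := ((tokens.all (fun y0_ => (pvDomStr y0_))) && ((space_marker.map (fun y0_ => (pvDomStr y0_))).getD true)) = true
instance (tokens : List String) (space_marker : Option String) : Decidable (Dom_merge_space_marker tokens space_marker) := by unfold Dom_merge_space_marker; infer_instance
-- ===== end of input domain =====

-- B replaces A's indexed look-ahead loop by a single look-behind pass (sentinel prev,
-- retroactive fusion into the last emitted element); objective: alternative decomposition.

-- ===== PORT A =====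
-- one loop step of A: 'if token == space_marker and i+1 < len(tokens) and tokens[i+1].startswith(...): append(space_marker + tokens[i+1]) elif not token.startswith(...): append(token)'
def pvStepA (tokens : List String) (space_marker : Option String)
    (merged : List String) (p : Int × String) : List String :=
  if some p.2 = space_marker ∧ p.1 + 1 < (tokens.length : Int) ∧
     PySem.Str.startswith ((PySem.List.pyGet? tokens (p.1 + 1)).getD "") "<FinGPTICKER_" = true
  then merged ++ [space_marker.getD "" ++ (PySem.List.pyGet? tokens (p.1 + 1)).getD ""]
  else if PySem.Str.startswith p.2 "<FinGPTICKER_" = true then merged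
  else merged ++ [p.2]

def merge_space_marker (tokens : List String) (space_marker : Option String) : List String :=
  (PySem.List.enumerate tokens).foldl (pvStepA tokens space_marker) []

-- ===== PORT B =====
-- one loop step of B: state (merged_tokens, prev); prev = none is the fresh sentinel
-- (distinct from every token and from space_marker, like Python's object()).
-- 'merged_tokens[-1] = space_marker + token' is ported as dropLast ++ [·]; Python raises
-- IndexError on an empty list there, which is reachable only outside Pre_.
def pvStepB (space_marker : Option String)
    (st : List String × Option String) (token : String) : List String × Option String :=
  if PySem.Str.startswith token "<FinGPTICKER_" = true then
    (if st.2.isSome ∧ st.2 = space_marker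
     then st.1.dropLast ++ [space_marker.getD "" ++ token]
     else st.1, some token)
  else (st.1 ++ [token], some token)

def merge_space_marker_alt (tokens : List String) (space_marker : Option String) : List String :=
  (tokens.foldl (pvStepB space_marker) ([], none)).1

-- ===== PRECONDITION & SPEC =====
-- no adjacent pair (s, ticker token) in tokens
def pvAdjFree (s : String) : List String → Bool
  | t :: u :: r => (!(t == s && PySem.Str.startswith u "<FinGPTICKER_")) && pvAdjFree s (u :: r)
  | _ => true

-- Pre_ excludes only the degenerate inputs whose space_marker itself starts with
-- "<FinGPTICKER_" AND occurs immediately before a ticker token: there A's branch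
-- priority still emits an accidental merge of the ticker-shaped marker, which B's
-- look-behind pass does not reproduce (B can even raise IndexError); A is total.
def Pre_merge_space_marker (tokens : List String) (space_marker : Option String) : Prop :=
  (space_marker.elim true (fun s =>
    !PySem.Str.startswith s "<FinGPTICKER_" || pvAdjFree s tokens)) = true
instance (tokens : List String) (space_marker : Option String) : Decidable (Pre_merge_space_marker tokens space_marker) := by unfold Pre_merge_space_marker; infer_instance

def pvWitness_merge_space_marker : List String × Option String :=
  (["_", "<FinGPTICKER_AAPL>", "hello"], some "_")

def Spec_merge_space_marker (tokens : List String) (space_marker : Option String) (out : List String) : Prop := out = merge_space_marker_alt tokens space_marker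
instance (tokens : List String) (space_marker : Option String) (out : List String) : Decidable (Spec_merge_space_marker tokens space_marker out) := by unfold Spec_merge_space_marker; infer_instance

-- ===== CLAIM (what is proved, stated in full; the proofs are below) =====
def Claim_equal_merge_space_marker : Prop := ∀ (tokens : List String) (space_marker : Option String), Dom_merge_space_marker tokens space_marker → Pre_merge_space_marker tokens space_marker → Spec_merge_space_marker tokens space_marker (merge_space_marker tokens space_marker)

-- ===== LEMMAS AND PROOFS =====

-- common reference recursion: A's per-position contribution (look-ahead form)
def pvGo (sm : Option String) : List String → List String
  | [] => []
  | [t] => if PySem.Str.startswith t "<FinGPTICKER_" = true then [] else [t]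
  | t :: u :: rest =>
    if some t = sm ∧ PySem.Str.startswith u "<FinGPTICKER_" = true then
      (sm.getD "" ++ u) :: pvGo sm (u :: rest)
    else if PySem.Str.startswith t "<FinGPTICKER_" = true then pvGo sm (u :: rest)
    else t :: pvGo sm (u :: rest)

-- what B emits for a finished token
def pvEmit (t : String) : List String :=
  if PySem.Str.startswith t "<FinGPTICKER_" = true then [] else [t]

lemma pvA_fold (tokens : List String) (sm : Option String) :
    ∀ (suffix : List String) (k : Nat) (acc : List String), tokens.drop k = suffix →
      (PySem.List.enumerate suffix (k : Int)).foldl (pvStepA tokens sm) acc = acc ++ pvGo sm suffix := by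
  intro suffix
  induction suffix with
  | nil => intro k acc _; simp [pvGo, PySem.List.enumerate]
  | cons t rest ih =>
    intro k acc hdrop
    have hk : k < tokens.length := by
      by_contra h
      simp [List.drop_eq_nil_of_le (Nat.le_of_not_lt h)] at hdrop
    have hdrop1 : tokens.drop (k + 1) = rest := by
      have := congrArg List.tail hdrop
      simpa [List.tail_drop] using this
    have hcast : ((k : Int) + 1) = ((k + 1 : Nat) : Int) := by push_cast; ring
    have hget : PySem.List.pyGet? tokens ((k : Int) + 1) = rest.head? := by
      rw [hcast, PySem.List.pyGet?_natCast, ← hdrop1]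
      simp [List.head?_eq_getElem?, List.getElem?_drop]
    have hlen : rest.length = tokens.length - (k + 1) := by
      rw [← hdrop1, List.length_drop]
    rw [PySem.List.enumerate_cons, List.foldl_cons]
    cases rest with
    | nil =>
      have hlt : ¬ ((k : Int) + 1 < (tokens.length : Int)) := by
        simp at hlen; omega
      simp only [pvStepA, pvGo]
      rw [if_neg (by rintro ⟨-, h2, -⟩; exact hlt h2)]
      simp [PySem.List.enumerate]
      split <;> simp
    | cons u rest' =>
      have hlt : (k : Int) + 1 < (tokens.length : Int) := by
        simp at hlen; omega
      have hgetu : (PySem.List.pyGet? tokens ((k : Int) + 1)).getD "" = u := by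
        rw [hget]; rfl
      rw [hcast]
      by_cases hts : some t = sm
      · by_cases hu : PySem.Str.startswith u "<FinGPTICKER_" = true
        · -- merge branch of A
          have hstep : pvStepA tokens sm acc ((k : Int), t) = acc ++ [sm.getD "" ++ u] := by
            simp only [pvStepA]
            rw [if_pos ⟨hts, hlt, by rw [hgetu]; exact hu⟩, hgetu]
          rw [hstep, ih (k + 1) _ hdrop1]
          simp at hu
          simp [pvGo, hts, hu]
        · have hnot : ¬ (some t = sm ∧ (k : Int) + 1 < (tokens.length : Int) ∧
              PySem.Str.startswith ((PySem.List.pyGet? tokens ((k : Int) + 1)).getD "") "<FinGPTICKER_" = true) := by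
            rintro ⟨-, -, h3⟩
            rw [hgetu] at h3
            exact hu h3
          by_cases ht : PySem.Str.startswith t "<FinGPTICKER_" = true
          · have hstep : pvStepA tokens sm acc ((k : Int), t) = acc := by
              simp only [pvStepA]
              rw [if_neg hnot, if_pos ht]
            rw [hstep, ih (k + 1) _ hdrop1]
            simp at hu ht
            simp [pvGo, hts, hu, ht]
          · have hstep : pvStepA tokens sm acc ((k : Int), t) = acc ++ [t] := by
              simp only [pvStepA]
              rw [if_neg hnot, if_neg ht]
            rw [hstep, ih (k + 1) _ hdrop1]
            simp at hu ht
            simp [pvGo, hts, hu, ht]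
      · have hnot : ¬ (some t = sm ∧ (k : Int) + 1 < (tokens.length : Int) ∧
            PySem.Str.startswith ((PySem.List.pyGet? tokens ((k : Int) + 1)).getD "") "<FinGPTICKER_" = true) := by
          rintro ⟨h1, -, -⟩
          exact hts h1
        by_cases ht : PySem.Str.startswith t "<FinGPTICKER_" = true
        · have hstep : pvStepA tokens sm acc ((k : Int), t) = acc := by
            simp only [pvStepA]
            rw [if_neg hnot, if_pos ht]
          rw [hstep, ih (k + 1) _ hdrop1]
          simp at ht
          simp [pvGo, hts, ht]
        · have hstep : pvStepA tokens sm acc ((k : Int), t) = acc ++ [t] := by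
            simp only [pvStepA]
            rw [if_neg hnot, if_neg ht]
          rw [hstep, ih (k + 1) _ hdrop1]
          simp at ht
          simp [pvGo, hts, ht]

lemma pvA_eq_go (tokens : List String) (sm : Option String) :
    merge_space_marker tokens sm = pvGo sm tokens := by
  have h := pvA_fold tokens sm tokens 0 [] (by simp)
  simpa [merge_space_marker] using h

lemma pvB_fold (sm : Option String)
    (hsm : ∀ s, sm = some s → PySem.Str.startswith s "<FinGPTICKER_" = false) :
    ∀ (rest : List String) (p : String) (outInit : List String),
      (rest.foldl (pvStepB sm) (outInit ++ pvEmit p, some p)).1 = outInit ++ pvGo sm (p :: rest) := by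
  intro rest
  induction rest with
  | nil => intro p outInit; simp [pvGo, pvEmit]
  | cons u rest' ih =>
    intro p outInit
    rw [List.foldl_cons]
    by_cases hu : PySem.Str.startswith u "<FinGPTICKER_" = true
    · simp at hu
      have hemitu : pvEmit u = [] := by simp [pvEmit, hu]
      by_cases hp : some p = sm
      · -- merge branch: the previously emitted token was the space marker
        have hps : PySem.Str.startswith p "<FinGPTICKER_" = false := hsm p hp.symm
        simp at hps
        have hemit : pvEmit p = [p] := by simp [pvEmit, hps]
        have hstep : pvStepB sm (outInit ++ pvEmit p, some p) u
            = (outInit ++ [sm.getD "" ++ u], some u) := by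
          rw [hemit]
          simp [pvStepB, hu, ← hp]
        rw [hstep]
        have hfold := ih u (outInit ++ [sm.getD "" ++ u])
        rw [hemitu, List.append_nil] at hfold
        rw [hfold]
        simp [pvGo, ← hp, hu]
      · have hstep : pvStepB sm (outInit ++ pvEmit p, some p) u
            = (outInit ++ pvEmit p, some u) := by
          simp [pvStepB, hu, hp]
        rw [hstep]
        have hfold := ih u (outInit ++ pvEmit p)
        rw [hemitu, List.append_nil] at hfold
        rw [hfold]
        by_cases hps : PySem.Str.startswith p "<FinGPTICKER_" = true <;>
          simp at hps <;> simp [pvGo, pvEmit, hp, hu, hps]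
    · simp at hu
      have hemitu : pvEmit u = [u] := by simp [pvEmit, hu]
      have hstep : pvStepB sm (outInit ++ pvEmit p, some p) u
          = ((outInit ++ pvEmit p) ++ [u], some u) := by
        simp [pvStepB, hu]
      rw [hstep]
      have hfold := ih u (outInit ++ pvEmit p)
      rw [hemitu] at hfold
      rw [hfold]
      by_cases hps : PySem.Str.startswith p "<FinGPTICKER_" = true <;>
        simp at hps <;> simp [pvGo, pvEmit, hu, hps]

lemma pvB_eq_go (tokens : List String) (sm : Option String)
    (hsm : ∀ s, sm = some s → PySem.Str.startswith s "<FinGPTICKER_" = false) :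
    merge_space_marker_alt tokens sm = pvGo sm tokens := by
  cases tokens with
  | nil => simp [merge_space_marker_alt, pvGo]
  | cons t rest =>
    unfold merge_space_marker_alt
    rw [List.foldl_cons]
    by_cases ht : PySem.Str.startswith t "<FinGPTICKER_" = true
    · simp at ht
      have hstep : pvStepB sm ([], none) t = ([], some t) := by simp [pvStepB, ht]
      rw [hstep]
      have hemit : pvEmit t = [] := by simp [pvEmit, ht]
      have hfold := pvB_fold sm hsm rest t []
      rw [hemit] at hfold
      simpa using hfold
    · simp at ht
      have hstep : pvStepB sm ([], none) t = ([t], some t) := by simp [pvStepB, ht]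
      rw [hstep]
      have hemit : pvEmit t = [t] := by simp [pvEmit, ht]
      have hfold := pvB_fold sm hsm rest t []
      rw [hemit] at hfold
      simpa using hfold

lemma pvGo_filter (s : String) :
    ∀ (l : List String), pvAdjFree s l = true →
      pvGo (some s) l = l.filter (fun t => !(PySem.Str.startswith t "<FinGPTICKER_")) := by
  intro l
  induction l with
  | nil => intro _; simp [pvGo]
  | cons t rest ih =>
    intro hadj
    cases rest with
    | nil =>
      by_cases ht : PySem.Str.startswith t "<FinGPTICKER_" = true <;>
        simp at ht <;> simp [pvGo, ht]
    | cons u rest' =>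
      simp only [pvAdjFree, Bool.and_eq_true] at hadj
      obtain ⟨h1, h2⟩ := hadj
      have hrec := ih h2
      simp at h1
      by_cases hts : t = s
      · subst hts
        have hu := h1.resolve_left (fun h => h rfl)
        by_cases ht : PySem.Str.startswith t "<FinGPTICKER_" = true <;>
          simp at ht <;> simp [pvGo, hu, ht, hrec]
      · by_cases ht : PySem.Str.startswith t "<FinGPTICKER_" = true <;>
          simp at ht <;> simp [pvGo, hts, ht, hrec]

lemma pvB_fold_free (s : String) :
    ∀ (rest : List String) (p : String) (out : List String),
      pvAdjFree s (p :: rest) = true →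
      (rest.foldl (pvStepB (some s)) (out, some p)).1
        = out ++ rest.filter (fun t => !(PySem.Str.startswith t "<FinGPTICKER_")) := by
  intro rest
  induction rest with
  | nil => intro p out _; simp
  | cons u rest' ih =>
    intro p out hadj
    simp only [pvAdjFree, Bool.and_eq_true] at hadj
    obtain ⟨h1, h2⟩ := hadj
    simp at h1
    rw [List.foldl_cons]
    by_cases hu : PySem.Str.startswith u "<FinGPTICKER_" = true
    · simp at hu
      have hps : ¬ (p = s) := by
        intro h
        rcases h1 with h1 | h1
        · exact h1 h
        · simp [h1] at hu
      have hstep : pvStepB (some s) (out, some p) u = (out, some u) := by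
        simp [pvStepB, hu, hps]
      rw [hstep, ih u out h2]
      simp [hu]
    · simp at hu
      have hstep : pvStepB (some s) (out, some p) u = (out ++ [u], some u) := by
        simp [pvStepB, hu]
      rw [hstep, ih u (out ++ [u]) h2]
      simp [hu]

lemma pvB_filter (tokens : List String) (s : String)
    (hadj : pvAdjFree s tokens = true) :
    merge_space_marker_alt tokens (some s)
      = tokens.filter (fun t => !(PySem.Str.startswith t "<FinGPTICKER_")) := by
  cases tokens with
  | nil => simp [merge_space_marker_alt]
  | cons t rest =>
    unfold merge_space_marker_alt
    rw [List.foldl_cons]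
    by_cases ht : PySem.Str.startswith t "<FinGPTICKER_" = true
    · simp at ht
      have hstep : pvStepB (some s) ([], none) t = ([], some t) := by simp [pvStepB, ht]
      rw [hstep, pvB_fold_free s rest t [] hadj]
      simp [ht]
    · simp at ht
      have hstep : pvStepB (some s) ([], none) t = ([t], some t) := by simp [pvStepB, ht]
      rw [hstep, pvB_fold_free s rest t [t] hadj]
      simp [ht]

-- ===== VERDICT (by name: the statement is the Claim_ definition above) =====
theorem merge_space_marker_spec : Claim_equal_merge_space_marker := by
  intro tokens sm _ hpre
  unfold Pre_merge_space_marker at hpre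
  unfold Spec_merge_space_marker
  rw [pvA_eq_go]
  cases sm with
  | none =>
    rw [pvB_eq_go tokens none (by intro s hs; cases hs)]
  | some s =>
    simp only [Option.elim_some, Bool.or_eq_true] at hpre
    rcases hpre with hns | hadj
    · rw [pvB_eq_go tokens (some s)
        (by intro s' hs'; injection hs' with h; subst h; simpa using hns)]
    · rw [pvB_filter tokens s hadj, pvGo_filter s tokens hadj]
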